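-- pv_equiv track=rewrite | github.com/Jeynova/Projet_final | AgentForge/agents/memory/learning_memory.py | _classify_code_pattern
-- ===== SOURCE A (Python) =====
-- def _classify_code_pattern(filename: str, code_content: str) -> str:
--     """Classify what type of pattern this code represents"""
--     filename_lower = filename.lower()
--     code_lower = str(code_content).lower()
--
--     # Authentication patterns
--     if any(keyword in filename_lower for keyword in ['auth', 'login', 'user']) and \
--        any(keyword in code_lower for keyword in ['password', 'jwt', 'bcrypt', 'login']):
--         return 'authentication'
--
--     # CRUD patterns
--     if any(keyword in code_lower for keyword in ['create', 'read', 'update', 'delete', 'findone', 'save']):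
--         return 'crud_operations'
--
--     # API routing patterns
--     if any(keyword in filename_lower for keyword in ['route', 'api', 'controller']) and \
--        any(keyword in code_lower for keyword in ['router', 'express', 'app.get', 'app.post']):
--         return 'api_routing'
--
--     # React component patterns
--     if filename_lower.endswith('.jsx') or filename_lower.endswith('.tsx') or \
--        any(keyword in code_lower for keyword in ['usestate', 'useeffect', 'react']):
--         return 'react_component'
--
--     # Database model patterns
--     if any(keyword in filename_lower for keyword in ['model', 'schema']) and \
--        any(keyword in code_lower for keyword in ['mongoose', 'sequelize', 'schema', 'model']):
--         return 'database_model'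
--
--     return None
-- ===== SOURCE B (Python) =====
-- FEATURES = [
--     ('auth_f',  'f', ['auth', 'login', 'user']),
--     ('auth_c',  'c', ['password', 'jwt', 'bcrypt', 'login']),
--     ('crud_c',  'c', ['create', 'read', 'update', 'delete', 'findone', 'save']),
--     ('route_f', 'f', ['route', 'api', 'controller']),
--     ('route_c', 'c', ['router', 'express', 'app.get', 'app.post']),
--     ('react_c', 'c', ['usestate', 'useeffect', 'react']),
--     ('model_f', 'f', ['model', 'schema']),
--     ('model_c', 'c', ['mongoose', 'sequelize', 'schema', 'model']),
-- ]
--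
-- DECISION = [
--     ({'auth_f', 'auth_c'},  'authentication'),
--     ({'crud_c'},            'crud_operations'),
--     ({'route_f', 'route_c'}, 'api_routing'),
--     ({'ext_jsx'},           'react_component'),
--     ({'react_c'},           'react_component'),
--     ({'model_f', 'model_c'}, 'database_model'),
-- ]
--
--
-- def _classify_code_pattern(filename: str, code_content: str) -> str:
--     """Two staged passes: extract all feature flags, then resolve the first
--     decision rule whose required flags are a subset of the extracted ones."""
--     fl = filename.lower()
--     cl = str(code_content).lower()
--
--     feats = {name for name, side, kws in FEATURES
--              if any(k in (fl if side == 'f' else cl) for k in kws)}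
--     if fl.endswith('.jsx') or fl.endswith('.tsx'):
--         feats.add('ext_jsx')
--
--     for required, label in DECISION:
--         if required <= feats:
--             return label
--     return None
-- ===== Notes on version B (the rewrite author's own statement) =====
-- stated objective: alternative
-- what changed: Splits the if-chain into two staged passes: an unconditional feature-extraction pass that builds a set of boolean feature flags from a keyword table, then a priority-resolution pass that returns the label of the first decision rule whose required flag set is a subset of the extracted set.
import Mathlib
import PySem

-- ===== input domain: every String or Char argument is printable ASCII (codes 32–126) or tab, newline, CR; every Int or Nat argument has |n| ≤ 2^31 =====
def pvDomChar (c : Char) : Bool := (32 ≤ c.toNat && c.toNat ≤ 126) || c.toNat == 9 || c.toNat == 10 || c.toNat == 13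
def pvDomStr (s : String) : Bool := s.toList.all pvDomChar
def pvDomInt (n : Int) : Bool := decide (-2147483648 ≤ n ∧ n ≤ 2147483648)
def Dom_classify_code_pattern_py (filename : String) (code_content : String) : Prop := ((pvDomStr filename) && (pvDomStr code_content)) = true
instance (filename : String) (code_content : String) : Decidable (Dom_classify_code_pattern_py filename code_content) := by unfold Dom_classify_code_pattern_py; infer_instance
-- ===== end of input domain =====

-- B splits A's if-chain into two staged passes: unconditional feature-flag extraction, then subset-based priority resolution (objective: alternative decomposition, same cost).

-- ===== PORT A =====
def classify_code_pattern_py (filename : String) (code_content : String) : Option String :=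
  let filename_lower := PySem.Str.lower filename
  let code_lower := PySem.Str.lower code_content
  if (["auth", "login", "user"].any (fun k => PySem.Str.isIn k filename_lower)) &&
     (["password", "jwt", "bcrypt", "login"].any (fun k => PySem.Str.isIn k code_lower)) then
    some "authentication"
  else if ["create", "read", "update", "delete", "findone", "save"].any
      (fun k => PySem.Str.isIn k code_lower) then
    some "crud_operations"
  else if (["route", "api", "controller"].any (fun k => PySem.Str.isIn k filename_lower)) &&
          (["router", "express", "app.get", "app.post"].any (fun k => PySem.Str.isIn k code_lower)) then
    some "api_routing"
  else if PySem.Str.endswith filename_lower ".jsx" || PySem.Str.endswith filename_lower ".tsx" ||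
          ["usestate", "useeffect", "react"].any (fun k => PySem.Str.isIn k code_lower) then
    some "react_component"
  else if (["model", "schema"].any (fun k => PySem.Str.isIn k filename_lower)) &&
          (["mongoose", "sequelize", "schema", "model"].any (fun k => PySem.Str.isIn k code_lower)) then
    some "database_model"
  else
    none

-- ===== PORT B =====
-- FEATURES table: (flag name, which string it reads ("f" = filename, "c" = code), keywords)
def pvFeatures : List (String × String × List String) :=
  [ ("auth_f",  "f", ["auth", "login", "user"]),
    ("auth_c",  "c", ["password", "jwt", "bcrypt", "login"]),
    ("crud_c",  "c", ["create", "read", "update", "delete", "findone", "save"]),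
    ("route_f", "f", ["route", "api", "controller"]),
    ("route_c", "c", ["router", "express", "app.get", "app.post"]),
    ("react_c", "c", ["usestate", "useeffect", "react"]),
    ("model_f", "f", ["model", "schema"]),
    ("model_c", "c", ["mongoose", "sequelize", "schema", "model"]) ]

-- DECISION table: (required flag set, label); first rule whose requirements are a subset wins
def pvDecision : List (PySem.Set String × String) :=
  [ (PySem.Set.ofList ["auth_f", "auth_c"],   "authentication"),
    (PySem.Set.ofList ["crud_c"],             "crud_operations"),
    (PySem.Set.ofList ["route_f", "route_c"], "api_routing"),
    (PySem.Set.ofList ["ext_jsx"],            "react_component"),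
    (PySem.Set.ofList ["react_c"],            "react_component"),
    (PySem.Set.ofList ["model_f", "model_c"], "database_model") ]

def pvResolve (feats : PySem.Set String) : List (PySem.Set String × String) → Option String
  | [] => none
  | (req, label) :: rest =>
      if PySem.Set.issubset req feats then some label else pvResolve feats rest

def classify_code_pattern_py_alt (filename : String) (code_content : String) : Option String :=
  let fl := PySem.Str.lower filename
  let cl := PySem.Str.lower code_content
  let feats := PySem.Set.ofList
    ((pvFeatures.filter
        (fun r => r.2.2.any (fun k => PySem.Str.isIn k (if r.2.1 == "f" then fl else cl)))).map
      (fun r => r.1))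
  let feats := if PySem.Str.endswith fl ".jsx" || PySem.Str.endswith fl ".tsx" then
      PySem.Set.add feats "ext_jsx" else feats
  pvResolve feats pvDecision

-- ===== PRECONDITION & SPEC =====
def Spec_classify_code_pattern_py (filename : String) (code_content : String) (out : Option String) : Prop := out = classify_code_pattern_py_alt filename code_content
instance (filename : String) (code_content : String) (out : Option String) : Decidable (Spec_classify_code_pattern_py filename code_content out) := by unfold Spec_classify_code_pattern_py; infer_instance

-- ===== CLAIM (what is proved, stated in full; the proofs are below) =====
def Claim_equal_classify_code_pattern_py : Prop := ∀ (filename : String) (code_content : String), Dom_classify_code_pattern_py filename code_content → Spec_classify_code_pattern_py filename code_content (classify_code_pattern_py filename code_content)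

-- ===== LEMMAS AND PROOFS =====

-- ===== VERDICT (by name: the statement is the Claim_ definition above) =====
theorem classify_code_pattern_py_spec : Claim_equal_classify_code_pattern_py := by
  intro filename code_content _
  unfold Spec_classify_code_pattern_py
  unfold classify_code_pattern_py classify_code_pattern_py_alt pvFeatures pvDecision
  simp only [List.filter, List.any,
    show (("c" : String) == "f") = false from rfl,
    show (("f" : String) == "f") = true from rfl,
    Bool.false_eq_true, if_true, if_false, Bool.or_false]
  generalize PySem.Str.lower filename = fl
  generalize PySem.Str.lower code_content = cl
  generalize h1 : (PySem.Str.isIn "auth" fl || (PySem.Str.isIn "login" fl || PySem.Str.isIn "user" fl)) = b1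
  generalize h2 : (PySem.Str.isIn "password" cl || (PySem.Str.isIn "jwt" cl || (PySem.Str.isIn "bcrypt" cl || PySem.Str.isIn "login" cl))) = b2
  generalize h3 : (PySem.Str.isIn "create" cl || (PySem.Str.isIn "read" cl || (PySem.Str.isIn "update" cl || (PySem.Str.isIn "delete" cl || (PySem.Str.isIn "findone" cl || PySem.Str.isIn "save" cl))))) = b3
  generalize h4 : (PySem.Str.isIn "route" fl || (PySem.Str.isIn "api" fl || PySem.Str.isIn "controller" fl)) = b4
  generalize h5 : (PySem.Str.isIn "router" cl || (PySem.Str.isIn "express" cl || (PySem.Str.isIn "app.get" cl || PySem.Str.isIn "app.post" cl))) = b5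
  generalize h6 : PySem.Str.endswith fl ".jsx" = b6
  generalize h7 : PySem.Str.endswith fl ".tsx" = b7
  generalize h8 : (PySem.Str.isIn "usestate" cl || (PySem.Str.isIn "useeffect" cl || PySem.Str.isIn "react" cl)) = b8
  generalize h9 : (PySem.Str.isIn "model" fl || PySem.Str.isIn "schema" fl) = b9
  generalize h10 : (PySem.Str.isIn "mongoose" cl || (PySem.Str.isIn "sequelize" cl || (PySem.Str.isIn "schema" cl || PySem.Str.isIn "model" cl))) = b10
  clear h1 h2 h3 h4 h5 h6 h7 h8 h9 h10
  revert b1 b2 b3 b4 b5 b6 b7 b8 b9 b10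
  decide
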